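-- pv_equiv track=rewrite | github.com/davidgonmar/compress | thesis/quantization/vision/plot_qat_vs_progressive.py | detect_bit_switches
-- ===== SOURCE A (Python) =====
-- def detect_bit_switches(runs_sorted):
--     switches = []
--     prev = runs_sorted[0].get("bits", None)
--     for rec in runs_sorted[1:]:
--         curr = rec.get("bits", None)
--         if curr is not None and curr != prev:
--             switches.append((rec["epoch"], f"{prev}→{curr}"))
--             prev = curr
--     return switches
-- ===== SOURCE B (Python) =====
-- def detect_bit_switches(runs_sorted):
--     # Reverse traversal: walk the tail right-to-left carrying the nearest
--     # not-yet-resolved record with bits ("pending"); when an earlier record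
--     # with bits b is found, b is pending's predecessor value, so emit a switch
--     # if they differ. The leftmost pending is finally resolved against the
--     # first record's bits. Output is built back-to-front and reversed.
--     bits0 = runs_sorted[0].get("bits", None)
--     out = []
--     pending = None  # (bits, epoch) of nearest unresolved record to the right
--     for rec in reversed(runs_sorted[1:]):
--         b = rec.get("bits", None)
--         if b is None:
--             continue
--         if pending is not None and pending[0] != b:
--             out.append((pending[1], f"{b}→{pending[0]}"))
--         pending = (b, rec["epoch"])
--     if pending is not None and pending[0] != bits0:
--         out.append((pending[1], f"{bits0}→{pending[0]}"))
--     return out[::-1]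
-- ===== Notes on version B (the rewrite author's own statement) =====
-- stated objective: alternative
-- what changed: Replaced A's forward scan carrying the previous bits value by a right-to-left scan that carries the nearest unresolved successor record (pending) and resolves each switch when its predecessor's bits are encountered, building the result back-to-front and reversing at the end.
-- outside the precondition, e.g. on detect_bit_switches([{'bits': 1}, {'bits': 1}]): A returns [], B raises KeyError
import Mathlib
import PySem

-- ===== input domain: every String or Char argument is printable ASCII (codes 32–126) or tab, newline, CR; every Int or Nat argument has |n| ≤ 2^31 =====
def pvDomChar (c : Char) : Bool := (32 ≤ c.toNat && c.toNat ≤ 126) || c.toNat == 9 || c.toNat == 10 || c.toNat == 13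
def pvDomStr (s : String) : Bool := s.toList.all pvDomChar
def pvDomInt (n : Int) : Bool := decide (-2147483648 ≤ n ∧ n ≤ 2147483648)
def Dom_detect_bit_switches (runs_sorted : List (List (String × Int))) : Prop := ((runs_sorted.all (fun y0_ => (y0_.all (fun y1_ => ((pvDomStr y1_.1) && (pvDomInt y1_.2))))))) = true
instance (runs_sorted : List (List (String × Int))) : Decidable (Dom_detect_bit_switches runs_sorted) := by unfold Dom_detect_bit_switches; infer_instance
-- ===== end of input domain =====

-- B replaces A's forward prev-carrying scan by a right-to-left scan carrying the nearest
-- unresolved successor record, building the output back-to-front; same cost, alternative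
-- decomposition; equivalence is about return values only.

-- ===== PORT A =====
-- f"{x}" for x = rec.get("bits"): "None" for a missing key, str(n) otherwise
def fmtBits : Option Int → String
  | none => "None"
  | some n => PySem.Int.toStr n

-- loop body of A: state = (switches, prev)
def dbsStepA (st : List (Int × String) × Option Int) (rec : List (String × Int)) :
    List (Int × String) × Option Int :=
  let curr := List.lookup "bits" rec
  if curr ≠ none ∧ curr ≠ st.2 then
    -- rec["epoch"] raises KeyError when absent: such inputs are excluded by Pre_; default 0 here
    (st.1 ++ [((List.lookup "epoch" rec).getD 0, fmtBits st.2 ++ "→" ++ fmtBits curr)], curr)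
  else st

def detect_bit_switches (runs_sorted : List (List (String × Int))) : List (Int × String) :=
  match runs_sorted with
  | [] => []  -- runs_sorted[0] raises IndexError here; excluded by Pre_
  | first :: rest => (rest.foldl dbsStepA ([], List.lookup "bits" first)).1

-- ===== PORT B =====
-- loop body of B's reverse scan: state = (out, pending), pending = (bits, epoch) of the
-- nearest unresolved bits-carrying record to the right
def dbsStepB (st : List (Int × String) × Option (Int × Int)) (rec : List (String × Int)) :
    List (Int × String) × Option (Int × Int) :=
  match List.lookup "bits" rec with
  | none => st
  | some b =>
    let out :=
      match st.2 with
      | some p =>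
        if p.1 ≠ b then st.1 ++ [(p.2, PySem.Int.toStr b ++ "→" ++ PySem.Int.toStr p.1)]
        else st.1
      | none => st.1
    -- rec["epoch"] raises KeyError when absent: excluded by Pre_; default 0 here
    (out, some (b, (List.lookup "epoch" rec).getD 0))

def detect_bit_switches_alt (runs_sorted : List (List (String × Int))) : List (Int × String) :=
  match runs_sorted with
  | [] => []  -- runs_sorted[0] raises IndexError here; excluded by Pre_
  | first :: rest =>
    let bits0 := List.lookup "bits" first
    let st := rest.reverse.foldl dbsStepB ([], none)
    let out :=
      match st.2 with
      | some p =>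
        if some p.1 ≠ bits0 then st.1 ++ [(p.2, fmtBits bits0 ++ "→" ++ PySem.Int.toStr p.1)]
        else st.1
      | none => st.1
    out.reverse  -- out[::-1]

-- ===== PRECONDITION & SPEC =====
-- Pre_ excludes the empty list (A raises IndexError) and inputs where a tail record has
-- "bits" but no "epoch" (A may raise KeyError there, and B always does); this slightly
-- over-excludes: on such a record whose bits never differ from prev, A returns normally
-- (see claim cites).
def Pre_detect_bit_switches (runs_sorted : List (List (String × Int))) : Prop :=
  runs_sorted ≠ [] ∧
  ∀ rec ∈ runs_sorted.tail, (List.lookup "bits" rec).isSome → (List.lookup "epoch" rec).isSome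
instance (runs_sorted : List (List (String × Int))) : Decidable (Pre_detect_bit_switches runs_sorted) := by unfold Pre_detect_bit_switches; infer_instance

def pvWitness_detect_bit_switches : (List (List (String × Int))) :=
  [[("bits", 2), ("epoch", 0)], [("epoch", 1)], [("bits", 3), ("epoch", 2)]]

def Spec_detect_bit_switches (runs_sorted : List (List (String × Int))) (out : List (Int × String)) : Prop := out = detect_bit_switches_alt runs_sorted
instance (runs_sorted : List (List (String × Int))) (out : List (Int × String)) : Decidable (Spec_detect_bit_switches runs_sorted out) := by unfold Spec_detect_bit_switches; infer_instance

-- ===== CLAIM =====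
def Claim_equal_detect_bit_switches : Prop := ∀ (runs_sorted : List (List (String × Int))), Dom_detect_bit_switches runs_sorted → Pre_detect_bit_switches runs_sorted → Spec_detect_bit_switches runs_sorted (detect_bit_switches runs_sorted)

-- ===== LEMMAS AND PROOFS =====

-- Proof-only functional characterisation of A's loop: head recursion over the tail.
def dbsGo (prev : Option Int) : List (List (String × Int)) → List (Int × String)
  | [] => []
  | r :: t =>
    match List.lookup "bits" r with
    | none => dbsGo prev t
    | some b =>
      if some b ≠ prev then
        ((List.lookup "epoch" r).getD 0, fmtBits prev ++ "→" ++ PySem.Int.toStr b)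
          :: dbsGo (some b) t
      else dbsGo (some b) t

-- first record carrying "bits": its bits, its epoch (getD 0), and what follows it
def dbsFirst : List (List (String × Int)) → Option (Int × Int × List (List (String × Int)))
  | [] => none
  | r :: t =>
    match List.lookup "bits" r with
    | some b => some (b, (List.lookup "epoch" r).getD 0, t)
    | none => dbsFirst t

theorem dbsA_foldl (rest : List (List (String × Int))) :
    ∀ (prev : Option Int) (acc : List (Int × String)),
      (rest.foldl dbsStepA (acc, prev)).1 = acc ++ dbsGo prev rest := by
  induction rest with
  | nil => intro prev acc; simp [dbsGo]
  | cons r t ih =>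
    intro prev acc
    cases hr : List.lookup "bits" r with
    | none =>
      have h1 : dbsStepA (acc, prev) r = (acc, prev) := by simp [dbsStepA, hr]
      simp only [List.foldl_cons, h1, dbsGo, hr, ih]
    | some b =>
      by_cases hb : some b = prev
      · have h1 : dbsStepA (acc, prev) r = (acc, some b) := by
          subst hb; simp [dbsStepA, hr]
        rw [List.foldl_cons, h1, ih]
        simp only [dbsGo, hr, if_neg (not_not_intro hb)]
      · have h1 : dbsStepA (acc, prev) r =
            (acc ++ [((List.lookup "epoch" r).getD 0,
              fmtBits prev ++ "→" ++ PySem.Int.toStr b)], some b) := by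
          simp only [dbsStepA, hr]
          rw [if_pos ⟨by simp, hb⟩]
          simp [fmtBits]
        rw [List.foldl_cons, h1, ih]
        simp only [dbsGo, hr, if_pos hb]
        simp
  
theorem dbsGo_first_none (rest : List (List (String × Int))) :
    dbsFirst rest = none → ∀ prev, dbsGo prev rest = [] := by
  induction rest with
  | nil => intro _ _; rfl
  | cons r t ih =>
    intro h prev
    cases hr : List.lookup "bits" r with
    | none =>
      simp only [dbsFirst, hr] at h
      simp only [dbsGo, hr]; exact ih h prev
    | some b => simp [dbsFirst, hr] at h

theorem dbsGo_first_some (rest : List (List (String × Int)))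
    (b e : Int) (t : List (List (String × Int))) :
    dbsFirst rest = some (b, e, t) → ∀ prev,
      dbsGo prev rest =
        if some b ≠ prev then
          (e, fmtBits prev ++ "→" ++ PySem.Int.toStr b) :: dbsGo (some b) t
        else dbsGo (some b) t := by
  induction rest with
  | nil => intro h; simp [dbsFirst] at h
  | cons r t' ih =>
    intro h prev
    cases hr : List.lookup "bits" r with
    | none =>
      simp only [dbsFirst, hr] at h
      simp only [dbsGo, hr]; exact ih h prev
    | some b' =>
      simp only [dbsFirst, hr, Option.some.injEq, Prod.mk.injEq] at h
      obtain ⟨hb, he, ht⟩ := h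
      subst hb he ht
      simp only [dbsGo, hr]

-- B's reverse foldl, characterised through dbsFirst and dbsGo.
theorem dbsB_foldl (rest : List (List (String × Int))) :
    rest.reverse.foldl dbsStepB ([], none) =
      match dbsFirst rest with
      | none => ([], none)
      | some (b, e, t) => ((dbsGo (some b) t).reverse, some (b, e)) := by
  induction rest with
  | nil => rfl
  | cons r t ih =>
    have hrev : (r :: t).reverse.foldl dbsStepB ([], none)
        = dbsStepB (t.reverse.foldl dbsStepB ([], none)) r := by
      simp [List.foldl_append]
    rw [hrev, ih]
    cases hr : List.lookup "bits" r with
    | none =>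
      cases hf : dbsFirst t with
      | none => simp only [dbsFirst, hr, hf, dbsStepB]
      | some p =>
        obtain ⟨b', e', t'⟩ := p
        simp only [dbsFirst, hr, hf, dbsStepB]
    | some b =>
      cases hf : dbsFirst t with
      | none =>
        simp only [dbsFirst, hr, dbsStepB]
        rw [dbsGo_first_none t hf (some b)]
        rfl
      | some p =>
        obtain ⟨b', e', t'⟩ := p
        simp only [dbsFirst, hr, dbsStepB]
        rw [dbsGo_first_some t b' e' t' hf (some b)]
        by_cases hbb : b' = b
        · subst hbb
          simp
        · rw [if_pos (fun h => hbb (Option.some.inj h))]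
          rw [if_pos hbb]
          simp [fmtBits]

-- ===== VERDICT =====
theorem detect_bit_switches_spec : Claim_equal_detect_bit_switches := by
  intro runs _ _
  unfold Spec_detect_bit_switches detect_bit_switches detect_bit_switches_alt
  cases runs with
  | nil => rfl
  | cons first rest =>
    simp only
    rw [dbsA_foldl rest (List.lookup "bits" first) [], List.nil_append, dbsB_foldl rest]
    cases hf : dbsFirst rest with
    | none => rw [dbsGo_first_none rest hf]; rfl
    | some p =>
      obtain ⟨b, e, t⟩ := p
      rw [dbsGo_first_some rest b e t hf (List.lookup "bits" first)]
      by_cases hb : some b = List.lookup "bits" first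
      · rw [if_neg (by simp [hb]), ← hb]
        simp
      · rw [if_pos (by simp [hb])]
        simp only [if_pos (by simp [hb] : some b ≠ List.lookup "bits" first)]
        simp [fmtBits]
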